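-- pv_equiv track=rewrite | github.com/miczho/competitive-coding | codeforces-1516-b.py | AGAGAXOOORRR
-- ===== SOURCE A (Python) =====
-- def AGAGAXOOORRR(n, arr):
--     psum = [0]
--
--     for i in arr:
--         psum.append(psum[-1] ^ i)
--
--     for i in range(n-1):
--         if psum[i+1] == psum[i+1] ^ psum[-1]:
--             return 'YES'
--
--     for i in range(n-1):
--         for j in range(i+1, n-1):
--             if psum[i+1] == psum[i+1] ^ psum[j+1] and psum[i+1] == psum[j+1] ^ psum[-1]:
--                 return 'YES'
--
--     return 'NO'
-- ===== SOURCE B (Python) =====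
-- def AGAGAXOOORRR(n, arr):
--     total = 0
--     for x in arr:
--         total ^= x
--     if n >= 2 and total == 0:
--         return 'YES'
--     pref = 0
--     seen_total = False
--     for p in range(1, n):
--         pref ^= arr[p - 1]
--         if seen_total and pref == 0:
--             return 'YES'
--         if pref == total:
--             seen_total = True
--     return 'NO'
-- ===== Notes on version B (the rewrite author's own statement) =====
-- stated objective: faster
-- what changed: Replaced the O(n^2) double scan over all prefix-xor pairs by a single O(n) pass that tracks the running prefix xor, remembers whether some earlier prefix equalled the total xor, and answers YES at the first later zero prefix (or immediately when the total xor is 0 and n>=2).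
import Mathlib
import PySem

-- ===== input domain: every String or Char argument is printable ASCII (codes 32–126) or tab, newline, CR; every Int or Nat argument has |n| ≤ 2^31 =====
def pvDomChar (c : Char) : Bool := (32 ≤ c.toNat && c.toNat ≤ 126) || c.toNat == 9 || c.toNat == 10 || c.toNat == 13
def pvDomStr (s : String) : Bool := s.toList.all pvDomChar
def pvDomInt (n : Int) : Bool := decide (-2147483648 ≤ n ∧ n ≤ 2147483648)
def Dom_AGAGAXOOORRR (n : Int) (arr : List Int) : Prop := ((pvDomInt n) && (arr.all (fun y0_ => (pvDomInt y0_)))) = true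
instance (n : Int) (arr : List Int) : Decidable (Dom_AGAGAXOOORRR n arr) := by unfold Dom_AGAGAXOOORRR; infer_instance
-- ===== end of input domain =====

-- B replaces A's quadratic scan over all prefix-xor pairs by one linear pass over the prefix xors.

-- ===== PORT A =====
-- psum = [0]; for i in arr: psum.append(psum[-1] ^ i)
def pvPsum (arr : List Int) : List Int :=
  arr.foldl (fun ps i => ps ++ [PySem.Int.bxor (PySem.List.pyGetD ps (-1) 0) i]) [0]

def AGAGAXOOORRR (n : Int) (arr : List Int) : String :=
  let psum := pvPsum arr
  -- first loop: for i in range(n-1): if psum[i+1] == psum[i+1] ^ psum[-1]: return 'YES'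
  if (PySem.List.pyRange 0 (n-1) 1).any (fun i =>
      decide (PySem.List.pyGetD psum (i+1) 0 =
        PySem.Int.bxor (PySem.List.pyGetD psum (i+1) 0) (PySem.List.pyGetD psum (-1) 0)))
  then "YES"
  -- second loop: for i in range(n-1): for j in range(i+1, n-1): if … and …: return 'YES'
  else if (PySem.List.pyRange 0 (n-1) 1).any (fun i =>
      (PySem.List.pyRange (i+1) (n-1) 1).any (fun j =>
        decide (PySem.List.pyGetD psum (i+1) 0 =
          PySem.Int.bxor (PySem.List.pyGetD psum (i+1) 0) (PySem.List.pyGetD psum (j+1) 0)) &&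
        decide (PySem.List.pyGetD psum (i+1) 0 =
          PySem.Int.bxor (PySem.List.pyGetD psum (j+1) 0) (PySem.List.pyGetD psum (-1) 0))))
  then "YES"
  else "NO"

-- ===== PORT B =====
-- the single pass: for p in range(1, n): pref ^= arr[p-1]; if seen_total and pref == 0: return 'YES'; if pref == total: seen_total = True
def pvScan (arr : List Int) (total : Int) : List Int → Int → Bool → String
  | [], _, _ => "NO"
  | p :: ps, pref, seen =>
    let pref' := PySem.Int.bxor pref (PySem.List.pyGetD arr (p - 1) 0)
    if seen = true ∧ pref' = 0 then "YES"
    else pvScan arr total ps pref' (seen || decide (pref' = total))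

def AGAGAXOOORRR_alt (n : Int) (arr : List Int) : String :=
  let total := arr.foldl (fun a x => PySem.Int.bxor a x) 0
  if 2 ≤ n ∧ total = 0 then "YES"
  else pvScan arr total (PySem.List.pyRange 1 n 1) 0 false

-- ===== PRECONDITION & SPEC =====
-- Pre_ is exactly where the Python A returns: either n ≤ len(arr)+1 (so every psum index that the
-- loops touch is in range), or the first loop already exits with 'YES' at i = 0 (n ≥ 2, arr
-- nonempty, total xor 0) before any out-of-range access; on all other inputs A raises IndexError.
def Pre_AGAGAXOOORRR (n : Int) (arr : List Int) : Prop :=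
  n ≤ (arr.length : Int) + 1 ∨
    (2 ≤ n ∧ 1 ≤ arr.length ∧ arr.foldl (fun a x => PySem.Int.bxor a x) 0 = 0)
instance (n : Int) (arr : List Int) : Decidable (Pre_AGAGAXOOORRR n arr) := by
  unfold Pre_AGAGAXOOORRR; infer_instance

def pvWitness_AGAGAXOOORRR : Int × List Int := (3, [1, 2, 3])

def Spec_AGAGAXOOORRR (n : Int) (arr : List Int) (out : String) : Prop := out = AGAGAXOOORRR_alt n arr
instance (n : Int) (arr : List Int) (out : String) : Decidable (Spec_AGAGAXOOORRR n arr out) := by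
  unfold Spec_AGAGAXOOORRR; infer_instance

-- ===== CLAIM (what is proved, stated in full; the proofs are below) =====
def Claim_equal_AGAGAXOOORRR : Prop := ∀ (n : Int) (arr : List Int), Dom_AGAGAXOOORRR n arr → Pre_AGAGAXOOORRR n arr → Spec_AGAGAXOOORRR n arr (AGAGAXOOORRR n arr)

-- ===== LEMMAS AND PROOFS =====

-- xor algebra for PySem.Int.bxor
theorem pv_bxor_cancel (a b : Int) : PySem.Int.bxor a (PySem.Int.bxor a b) = b := by
  unfold PySem.Int.bxor
  by_cases ha : 0 ≤ a <;> by_cases hb : 0 ≤ b <;>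
    simp [ha, hb, Nat.xor_xor_cancel_left] <;> omega

theorem pv_eq_bxor_iff (a t : Int) : (a = PySem.Int.bxor a t) ↔ t = 0 := by
  constructor
  · intro h
    have h2 : PySem.Int.bxor a a = PySem.Int.bxor a (PySem.Int.bxor a t) := by rw [← h]
    rw [pv_bxor_cancel, PySem.Int.bxor_self] at h2
    exact h2.symm
  · intro h; rw [h, PySem.Int.bxor_zero]

theorem pv_bxor_zero_left (t : Int) : PySem.Int.bxor 0 t = t := by
  rw [PySem.Int.bxor_comm, PySem.Int.bxor_zero]

-- pvG arr i = xor of the first i elements of arr (the i-th prefix xor)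
def pvG (arr : List Int) (i : Int) : Int :=
  (arr.take i.toNat).foldl (fun a x => PySem.Int.bxor a x) 0

theorem pvPsum_eq (arr : List Int) :
    pvPsum arr = (List.range (arr.length + 1)).map (fun k => pvG arr (Int.ofNat k)) := by
  induction arr using List.reverseRecOn with
  | nil => simp [pvPsum, pvG]
  | append_singleton xs x ih =>
    unfold pvPsum at *
    rw [List.foldl_append, ih]
    simp only [List.foldl_cons, List.foldl_nil]
    rw [List.length_append, List.length_singleton]
    rw [List.range_succ (n := xs.length + 1), List.map_append]
    congr 1
    · apply List.map_congr_left
      intro k hk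
      simp only [List.mem_range] at hk
      simp [pvG, Int.toNat_natCast, List.take_append_of_le_length (by omega : k ≤ xs.length)]
    · rw [List.range_succ, List.map_append]
      simp only [List.map_cons, List.map_nil]
      rw [PySem.List.pyGetD_neg_one_append_singleton]
      congr 1
      simp only [pvG, Int.ofNat_eq_natCast, Int.toNat_natCast]
      have h1 : (xs ++ [x]).take (xs.length + 1) = xs ++ [x] := by
        apply List.take_of_length_le; simp
      have h2 : xs.take xs.length = xs := List.take_length ..
      rw [h1, h2, List.foldl_append]
      simp

theorem pvPsum_last (arr : List Int) :
    PySem.List.pyGetD (pvPsum arr) (-1) 0 = arr.foldl (fun a x => PySem.Int.bxor a x) 0 := by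
  rw [pvPsum_eq, List.range_succ, List.map_append]
  simp only [List.map_cons, List.map_nil]
  rw [PySem.List.pyGetD_neg_one_append_singleton]
  simp [pvG, Int.ofNat_eq_natCast, Int.toNat_natCast]

theorem pvPsum_get (arr : List Int) (i : Int) (h0 : 0 ≤ i) (h1 : i ≤ (arr.length : Int)) :
    PySem.List.pyGetD (pvPsum arr) i 0 = pvG arr i := by
  rw [pvPsum_eq]
  have hlen : i < (((List.range (arr.length + 1)).map (fun k => pvG arr (Int.ofNat k))).length : Int) := by
    simp; omega
  rw [PySem.List.pyGetD_eq_getElem _ _ h0 hlen]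
  have hk : i.toNat < (List.range (arr.length + 1)).length := by simp; omega
  rw [List.getElem_map, List.getElem_range]
  congr 1
  simp [Int.ofNat_eq_natCast]
  omega

theorem pvG_step (arr : List Int) (k : Int) (h0 : 0 ≤ k) (h1 : k < (arr.length : Int)) :
    pvG arr (k + 1) = PySem.Int.bxor (pvG arr k) (PySem.List.pyGetD arr k 0) := by
  have hk : (k + 1).toNat = k.toNat + 1 := by omega
  have hkl : k.toNat < arr.length := by omega
  unfold pvG
  rw [hk, List.take_add_one, List.getElem?_eq_getElem hkl]
  simp only [Option.toList_some, List.foldl_append, List.foldl_cons, List.foldl_nil]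
  congr 1
  rw [PySem.List.pyGetD_eq_getElem _ _ h0 (by omega)]

-- A's first loop, characterised: it fires iff n ≥ 2 and the total xor is 0
theorem pv_any1_iff (n : Int) (arr : List Int) :
    ((PySem.List.pyRange 0 (n-1) 1).any (fun i =>
      decide (PySem.List.pyGetD (pvPsum arr) (i+1) 0 =
        PySem.Int.bxor (PySem.List.pyGetD (pvPsum arr) (i+1) 0) (PySem.List.pyGetD (pvPsum arr) (-1) 0))) = true) ↔
    (2 ≤ n ∧ arr.foldl (fun a x => PySem.Int.bxor a x) 0 = 0) := by
  rw [List.any_eq_true]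
  simp only [PySem.List.mem_pyRange_one, decide_eq_true_eq, pv_eq_bxor_iff, pvPsum_last]
  constructor
  · rintro ⟨i, ⟨h0, h1⟩, h2⟩; exact ⟨by omega, h2⟩
  · rintro ⟨h2, h0⟩; exact ⟨0, ⟨le_refl 0, by omega⟩, h0⟩

-- A's second loop, characterised: a later zero prefix after a prefix equal to the total
theorem pv_any2_iff (n : Int) (arr : List Int) (hn : n ≤ (arr.length : Int) + 1) :
    ((PySem.List.pyRange 0 (n-1) 1).any (fun i =>
      (PySem.List.pyRange (i+1) (n-1) 1).any (fun j =>
        decide (PySem.List.pyGetD (pvPsum arr) (i+1) 0 =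
          PySem.Int.bxor (PySem.List.pyGetD (pvPsum arr) (i+1) 0) (PySem.List.pyGetD (pvPsum arr) (j+1) 0)) &&
        decide (PySem.List.pyGetD (pvPsum arr) (i+1) 0 =
          PySem.Int.bxor (PySem.List.pyGetD (pvPsum arr) (j+1) 0) (PySem.List.pyGetD (pvPsum arr) (-1) 0)))) = true) ↔
    (∃ i j, 0 ≤ i ∧ i + 1 ≤ j ∧ j < n - 1 ∧ pvG arr (j+1) = 0 ∧
      pvG arr (i+1) = arr.foldl (fun a x => PySem.Int.bxor a x) 0) := by
  rw [List.any_eq_true]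
  simp only [List.any_eq_true, PySem.List.mem_pyRange_one, Bool.and_eq_true, decide_eq_true_eq,
    pv_eq_bxor_iff, pvPsum_last]
  constructor
  · rintro ⟨i, ⟨hi0, hi1⟩, j, ⟨hj0, hj1⟩, h1, h2⟩
    rw [pvPsum_get arr (j+1) (by omega) (by omega)] at h1
    rw [pvPsum_get arr (i+1) (by omega) (by omega), pvPsum_get arr (j+1) (by omega) (by omega),
        h1, pv_bxor_zero_left] at h2
    exact ⟨i, j, hi0, hj0, hj1, h1, h2⟩
  · rintro ⟨i, j, hi0, hj0, hj1, h1, h2⟩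
    refine ⟨i, ⟨hi0, by omega⟩, j, ⟨hj0, hj1⟩, ?_, ?_⟩
    · rw [pvPsum_get arr (j+1) (by omega) (by omega)]; exact h1
    · rw [pvPsum_get arr (i+1) (by omega) (by omega), pvPsum_get arr (j+1) (by omega) (by omega),
          h1, pv_bxor_zero_left]
      exact h2

-- B's single pass, characterised by the loop invariant
theorem pvScan_iff (arr : List Int) (t n : Int) (hn : n ≤ (arr.length : Int) + 1) :
    ∀ (fuel : Nat) (q : Int) (seen : Bool), 1 ≤ q → fuel = (n - q).toNat →
    (pvScan arr t (PySem.List.pyRange q n 1) (pvG arr (q - 1)) seen = "YES" ↔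
      ∃ j, q ≤ j ∧ j < n ∧ pvG arr j = 0 ∧
        (seen = true ∨ ∃ i, q ≤ i ∧ i < j ∧ pvG arr i = t)) := by
  intro fuel
  induction fuel with
  | zero =>
    intro q seen hq hf
    have hnq : n ≤ q := by omega
    rw [PySem.List.pyRange_one_eq_nil hnq]
    simp only [pvScan]
    constructor
    · intro h; exact absurd h (by decide)
    · rintro ⟨j, hj1, hj2, _⟩; omega
  | succ fuel ih =>
    intro q seen hq hf
    have hqn : q < n := by omega
    rw [PySem.List.pyRange_one_cons hqn]
    have hstep : PySem.Int.bxor (pvG arr (q-1)) (PySem.List.pyGetD arr (q-1) 0) = pvG arr q := by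
      have := pvG_step arr (q-1) (by omega) (by omega)
      rw [show q - 1 + 1 = q by ring] at this
      exact this.symm
    simp only [pvScan, hstep]
    by_cases hc : seen = true ∧ pvG arr q = 0
    · rw [if_pos hc]
      simp only [true_iff]
      exact ⟨q, le_refl q, hqn, hc.2, Or.inl hc.1⟩
    · rw [if_neg hc]
      have harg : pvG arr q = pvG arr (q + 1 - 1) := by norm_num
      rw [harg, ih (q+1) (seen || decide (pvG arr (q + 1 - 1) = t)) (by omega) (by omega)]
      rw [← harg]
      constructor
      · rintro ⟨j, hj1, hj2, hj0, hrest⟩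
        refine ⟨j, by omega, hj2, hj0, ?_⟩
        rcases hrest with hs | ⟨i, hi1, hi2, hit⟩
        · rcases Bool.or_eq_true_iff.mp hs with hs | hs
          · exact Or.inl hs
          · exact Or.inr ⟨q, le_refl q, by omega, of_decide_eq_true hs⟩
        · exact Or.inr ⟨i, by omega, hi2, hit⟩
      · rintro ⟨j, hj1, hj2, hj0, hrest⟩
        by_cases hjq : j = q
        · subst hjq
          rcases hrest with hs | ⟨i, hi1, hi2, _⟩
          · exact absurd ⟨hs, hj0⟩ hc
          · omega
        · refine ⟨j, by omega, hj2, hj0, ?_⟩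
          rcases hrest with hs | ⟨i, hi1, hi2, hit⟩
          · exact Or.inl (by simp [hs])
          · by_cases hiq : i = q
            · subst hiq
              exact Or.inl (by simp [hit])
            · exact Or.inr ⟨i, by omega, hi2, hit⟩

-- pvScan only ever returns "YES" or "NO"
theorem pvScan_cases (arr : List Int) (t : Int) :
    ∀ (ps : List Int) (pref : Int) (seen : Bool),
      pvScan arr t ps pref seen = "YES" ∨ pvScan arr t ps pref seen = "NO" := by
  intro ps
  induction ps with
  | nil => intro pref seen; right; rfl
  | cons p ps ih =>
    intro pref seen
    simp only [pvScan]
    split_ifs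
    · left; rfl
    · exact ih _ _

-- ===== VERDICT (by name: the statement is the Claim_ definition above) =====
theorem AGAGAXOOORRR_spec : Claim_equal_AGAGAXOOORRR := by
  intro n arr _ hPre
  unfold Pre_AGAGAXOOORRR at hPre
  unfold Spec_AGAGAXOOORRR AGAGAXOOORRR AGAGAXOOORRR_alt
  simp only []
  by_cases h0 : 2 ≤ n ∧ arr.foldl (fun a x => PySem.Int.bxor a x) 0 = 0
  · rw [if_pos ((pv_any1_iff n arr).mpr h0), if_pos h0]
  · rw [if_neg (fun h => h0 ((pv_any1_iff n arr).mp h)), if_neg h0]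
    have hn : n ≤ (arr.length : Int) + 1 := by
      rcases hPre with h | ⟨h1, h2, h3⟩
      · exact h
      · exact absurd ⟨h1, h3⟩ h0
    have h00 : pvG arr (1 - 1 : Int) = 0 := by simp [pvG]
    have hscan := pvScan_iff arr (arr.foldl (fun a x => PySem.Int.bxor a x) 0) n hn
      (n - 1).toNat 1 false (by omega) (by omega)
    rw [h00] at hscan
    have hany2 := pv_any2_iff n arr hn
    have hbridge : (∃ i j, 0 ≤ i ∧ i + 1 ≤ j ∧ j < n - 1 ∧ pvG arr (j+1) = 0 ∧
        pvG arr (i+1) = arr.foldl (fun a x => PySem.Int.bxor a x) 0) ↔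
        (∃ j, 1 ≤ j ∧ j < n ∧ pvG arr j = 0 ∧
          (false = true ∨ ∃ i, 1 ≤ i ∧ i < j ∧
            pvG arr i = arr.foldl (fun a x => PySem.Int.bxor a x) 0)) := by
      constructor
      · rintro ⟨i, j, hi0, hj0, hj1, hgj, hgi⟩
        exact ⟨j+1, by omega, by omega, hgj, Or.inr ⟨i+1, by omega, by omega, hgi⟩⟩
      · rintro ⟨j, hj1, hjn, hgj, hrest⟩
        rcases hrest with hfalse | ⟨i, hi1, hij, hgi⟩
        · exact absurd hfalse (by decide)
        · refine ⟨i - 1, j - 1, by omega, by omega, by omega, ?_, ?_⟩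
          · rw [show j - 1 + 1 = j by ring]; exact hgj
          · rw [show i - 1 + 1 = i by ring]; exact hgi
    by_cases hE : ∃ j, 1 ≤ j ∧ j < n ∧ pvG arr j = 0 ∧
        (false = true ∨ ∃ i, 1 ≤ i ∧ i < j ∧
          pvG arr i = arr.foldl (fun a x => PySem.Int.bxor a x) 0)
    · rw [if_pos (hany2.mpr (hbridge.mpr hE)), (hscan.mpr hE)]
    · rw [if_neg (fun h => hE (hbridge.mp (hany2.mp h)))]
      rcases pvScan_cases arr (arr.foldl (fun a x => PySem.Int.bxor a x) 0)
        (PySem.List.pyRange 1 n 1) 0 false with h | h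
      · exact absurd (hscan.mp h) hE
      · rw [h]
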